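-- pv_equiv track=rewrite | github.com/Tewi/PrefixFreeCodes | Experiments/alternationMeasure.py | EISignature
-- ===== SOURCE A (Python) =====
-- def EISignature(W):
--     """Given a list of weights, return the EI signature of the instance recording the result of each comparison performed by Huffman's algorithm or van Leeuwen's algorithm.
--
--     >>> EISignature([1,1,4])
--     'EEIEI'
--    """
--
--     if W==[]:
--         return ""
--     elif len(W)==1:
--         return "E"
--     W = sorted(W)
--     i = 0
--     trees = []
--     signature = ""
--     while i<len(W) or len(trees)>1:
--         if len(trees) == 0 or (i<len(W) and W[i] <= trees[0][0]):
--             left = [W[i]]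
--             i += 1
--             signature = signature + "E"
--         else:
--             left = trees[0]
--             trees = trees[1:]
--             signature = signature + "I"
--         if len(trees) == 0 or (i<len(W) and W[i] <= trees[0][0]):
--             right = [W[i]]
--             i += 1
--             signature = signature + "E"
--         else:
--             right = trees[0]
--             trees = trees[1:]
--             signature = signature + "I"
--         parent = [left[0] + right[0], left,right]
--         trees.append(parent)
--     signature = signature + "I"
--     return signature
-- ===== SOURCE B (Python) =====
-- def EISignature(W):
--     n = len(W)
--     if n == 0:
--         return ""
--     if n == 1:
--         return "E"
--     W = sorted(W)
--     i = 0
--     trees = []   # merged-node weights only, consumed from index j (no slicing)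
--     j = 0
--     sig = []
--     while i < n or len(trees) - j > 1:
--         pair = 0
--         for _ in range(2):
--             if j >= len(trees) or (i < n and W[i] <= trees[j]):
--                 pair += W[i]
--                 i += 1
--                 sig.append("E")
--             else:
--                 pair += trees[j]
--                 j += 1
--                 sig.append("I")
--         trees.append(pair)
--     sig.append("I")
--     return "".join(sig)
-- ===== Notes on version B (the rewrite author's own statement) =====
-- stated objective: faster
-- what changed: Replaces the O(n^2) nested-list tree queue (trees=trees[1:] slicing) and quadratic string concatenation with an index pointer over a weights-only list and a joined list of signature characters, folding the left/right picks into one two-step accumulator loop.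
import Mathlib
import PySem

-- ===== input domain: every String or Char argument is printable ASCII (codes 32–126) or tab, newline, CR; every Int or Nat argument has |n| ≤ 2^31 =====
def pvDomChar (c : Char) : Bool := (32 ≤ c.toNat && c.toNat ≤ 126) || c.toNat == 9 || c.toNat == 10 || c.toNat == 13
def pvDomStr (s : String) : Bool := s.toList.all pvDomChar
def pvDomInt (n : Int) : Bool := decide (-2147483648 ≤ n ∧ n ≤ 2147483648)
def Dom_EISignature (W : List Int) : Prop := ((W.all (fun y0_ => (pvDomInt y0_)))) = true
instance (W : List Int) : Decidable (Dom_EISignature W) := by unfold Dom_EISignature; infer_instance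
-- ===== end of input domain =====

-- B replaces A's O(n^2) list-slicing tree queue and string concatenation by an index
-- pointer over a weights-only queue and a joined character list (objective: faster).

-- ===== PORT A =====
-- A's trees are nested lists [weight, left, right] / [weight]; ported as an inductive tree.
inductive PvTree where
  | leaf : Int → PvTree
  | node : Int → PvTree → PvTree → PvTree
deriving DecidableEq, Repr

def PvTree.wt : PvTree → Int
  | .leaf x => x
  | .node x _ _ => x

-- one `if … else …` pick of A's loop body (done twice per iteration for left and right);
-- none = Python IndexError (W[i] with i out of range), which A never reaches.
-- W[i] is read with getD under the guard i < W.length, where it is exact.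
def pickA (W : List Int) (i : Nat) (trees : List PvTree) :
    Option (PvTree × Nat × List PvTree × String) :=
  match trees with
  | [] => if i < W.length then some (.leaf (W.getD i 0), i + 1, [], "E") else none
  | t :: rest =>
      if i < W.length ∧ W.getD i 0 ≤ t.wt then
        some (.leaf (W.getD i 0), i + 1, t :: rest, "E")
      else
        some (t, i, rest, "I")

-- the `while` loop of A; state (i, trees, signature) exactly as in the Python.
-- fuel only makes the recursion structural: the loop runs at most W.length - 1
-- iterations (each merges two nodes into one), so fuel = W.length + 1 never runs out.
def loopA (fuel : Nat) (W : List Int) (i : Nat) (trees : List PvTree) (sig : String) : String :=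
  match fuel with
  | 0 => sig
  | fuel + 1 =>
    if i < W.length ∨ trees.length > 1 then
      match pickA W i trees with
      | none => sig
      | some (l, i1, t1, s1) =>
        match pickA W i1 t1 with
        | none => sig ++ s1
        | some (r, i2, t2, s2) =>
            loopA fuel W i2 (t2 ++ [.node (l.wt + r.wt) l r]) (sig ++ s1 ++ s2)
    else sig

def EISignature (W : List Int) : String :=
  if W = [] then ""
  else if W.length = 1 then "E"
  else loopA (W.length + 1) (PySem.List.sorted W (fun x => x) false) 0 [] "" ++ "I"

-- ===== PORT B =====
-- one step of Source B's inner `for _ in range(2)` loop; none = IndexError (never reached)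
def stepB (W : List Int) (trees : List Int) (i j : Nat) : Option (Int × Nat × Nat × Char) :=
  if trees.length ≤ j ∨ (i < W.length ∧ W.getD i 0 ≤ trees.getD j 0) then
    if i < W.length then some (W.getD i 0, i + 1, j, 'E') else none
  else
    some (trees.getD j 0, i, j + 1, 'I')

-- Source B's `while` loop: weights-only queue `trees` read from index j, signature as
-- char list; fuel = W.length + 1 makes the recursion structural and never runs out.
def loopB (fuel : Nat) (W : List Int) (trees : List Int) (i j : Nat) (sig : List Char) : List Char :=
  match fuel with
  | 0 => sig
  | fuel + 1 =>
    if i < W.length ∨ trees.length - j > 1 then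
      match stepB W trees i j with
      | none => sig
      | some (w1, i1, j1, c1) =>
        match stepB W trees i1 j1 with
        | none => sig ++ [c1]
        | some (w2, i2, j2, c2) =>
            loopB fuel W (trees ++ [w1 + w2]) i2 j2 (sig ++ [c1, c2])
    else sig

def EISignature_alt (W : List Int) : String :=
  if W.length = 0 then ""
  else if W.length = 1 then "E"
  else String.ofList (loopB (W.length + 1) (PySem.List.sorted W (fun x => x) false) [] 0 0 [] ++ ['I'])

-- ===== PRECONDITION & SPEC =====
def Spec_EISignature (W : List Int) (out : String) : Prop := out = EISignature_alt W
instance (W : List Int) (out : String) : Decidable (Spec_EISignature W out) := by unfold Spec_EISignature; infer_instance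

-- ===== CLAIM (what is proved, stated in full; the proofs are below) =====
def Claim_equal_EISignature : Prop := ∀ (W : List Int), Dom_EISignature W → Spec_EISignature W (EISignature W)

-- ===== LEMMAS AND PROOFS =====

-- one pick of A corresponds to one step of B under the queue-suffix invariant
theorem step_corr (W : List Int) (i j : Nat) (tA : List PvTree) (tB : List Int)
    (hm : tA.map PvTree.wt = tB.drop j) (hj : j ≤ tB.length) :
    (pickA W i tA = none ∧ stepB W tB i j = none) ∨
    (∃ x i' tA' s v j' c, pickA W i tA = some (x, i', tA', s) ∧
      stepB W tB i j = some (v, i', j', c) ∧ x.wt = v ∧ s = String.ofList [c] ∧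
      tA'.map PvTree.wt = tB.drop j' ∧ j' ≤ tB.length ∧ tA'.length = tB.length - j') := by
  cases tA with
  | nil =>
      have hd : tB.drop j = [] := by simpa using hm.symm
      have hlej : tB.length ≤ j := List.drop_eq_nil_iff.mp hd
      by_cases hiw : i < W.length
      · refine Or.inr ⟨.leaf (W.getD i 0), i + 1, [], "E", W.getD i 0, j, 'E', ?_, ?_, rfl, rfl, ?_, hj, ?_⟩
        · simp only [pickA]; rw [if_pos hiw]
        · simp only [stepB]; rw [if_pos (Or.inl hlej), if_pos hiw]
        · simpa using hd.symm
        · simp; omega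
      · exact Or.inl ⟨by simp only [pickA]; rw [if_neg hiw],
          by simp only [stepB]; rw [if_pos (Or.inl hlej), if_neg hiw]⟩
  | cons t restA =>
      have hd : tB.drop j = t.wt :: restA.map PvTree.wt := hm.symm ▸ rfl
      have hne : tB.drop j ≠ [] := by rw [hd]; simp
      have hlt : j < tB.length := by
        by_contra hcon
        exact hne (List.drop_eq_nil_iff.mpr (by omega))
      have hget : tB.getD j 0 = t.wt := by
        have h0 : tB[j]? = some t.wt := by
          have hx : (tB.drop j)[0]? = tB[j + 0]? := List.getElem?_drop
          rw [hd] at hx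
          simpa using hx.symm
        simp [List.getD_eq_getElem?_getD, h0]
      have hdrop1 : tB.drop (j + 1) = restA.map PvTree.wt := by
        have hx : (tB.drop j).tail = tB.drop (j + 1) := List.tail_drop
        rw [hd] at hx
        simpa using hx.symm
      by_cases hc : i < W.length ∧ W.getD i 0 ≤ t.wt
      · refine Or.inr ⟨.leaf (W.getD i 0), i + 1, t :: restA, "E", W.getD i 0, j, 'E', ?_, ?_, rfl, rfl, hm, hj, ?_⟩
        · simp only [pickA]; rw [if_pos hc]
        · have hcond : tB.length ≤ j ∨ (i < W.length ∧ W.getD i 0 ≤ tB.getD j 0) := by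
            rw [hget]; exact Or.inr hc
          simp only [stepB]; rw [if_pos hcond, if_pos hc.1]
        · have := congrArg List.length hm; simp at this; simpa using this
      · refine Or.inr ⟨t, i, restA, "I", tB.getD j 0, j + 1, 'I', ?_, ?_, hget.symm, rfl, ?_, by omega, ?_⟩
        · simp only [pickA]; rw [if_neg hc]
        · have hcond : ¬ (tB.length ≤ j ∨ (i < W.length ∧ W.getD i 0 ≤ tB.getD j 0)) := by
            rw [hget]; push_neg
            exact ⟨by omega, fun h1 => by by_contra h2; exact hc ⟨h1, by omega⟩⟩
          simp only [stepB]; rw [if_neg hcond]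
        · exact hdrop1.symm
        · have := congrArg List.length hdrop1
          simp at this; omega

-- the two loops agree under the invariant: A's tree queue carries exactly the
-- weights tB.drop j, and A's string equals the join of B's character list
theorem loop_corr (fuel : Nat) : ∀ (W : List Int) (i j : Nat) (tA : List PvTree) (tB : List Int)
    (sigB : List Char), tA.map PvTree.wt = tB.drop j → j ≤ tB.length →
    loopA fuel W i tA (String.ofList sigB) = String.ofList (loopB fuel W tB i j sigB) := by
  induction fuel with
  | zero => intro W i j tA tB sigB _ _; rfl
  | succ fuel IH =>
    intro W i j tA tB sigB hm hj
    have hlen : tA.length = tB.length - j := by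
      have := congrArg List.length hm; simpa using this
    by_cases hg : i < W.length ∨ tA.length > 1
    · have hg' : i < W.length ∨ tB.length - j > 1 := by
        rcases hg with h | h
        · exact Or.inl h
        · exact Or.inr (by omega)
      rcases step_corr W i j tA tB hm hj with ⟨hpn, hsn⟩ |
        ⟨l, i1, tA1, s1, v1, j1, c1, hp1, hs1, hv1, hc1, hm1, hj1, hlen1⟩
      · simp only [loopA, loopB, if_pos hg, if_pos hg', hpn, hsn]
      · rcases step_corr W i1 j1 tA1 tB hm1 hj1 with ⟨hpn2, hsn2⟩ |
          ⟨r, i2, tA2, s2, v2, j2, c2, hp2, hs2, hv2, hc2, hm2, hj2, hlen2⟩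
        · simp only [loopA, loopB, if_pos hg, if_pos hg', hp1, hs1, hpn2, hsn2]
          rw [hc1]
          simp
        · simp only [loopA, loopB, if_pos hg, if_pos hg', hp1, hs1, hp2, hs2]
          have hm' : (tA2 ++ [PvTree.node (l.wt + r.wt) l r]).map PvTree.wt
              = (tB ++ [v1 + v2]).drop j2 := by
            rw [List.drop_append_of_le_length hj2, List.map_append, hm2, hv1, hv2]
            rfl
          have hj' : j2 ≤ (tB ++ [v1 + v2]).length := by simp; omega
          have hsig : String.ofList sigB ++ s1 ++ s2 = String.ofList (sigB ++ [c1, c2]) := by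
            rw [hc1, hc2, String.append_assoc, ← String.ofList_append, ← String.ofList_append]
            rfl
          rw [hsig]
          exact IH W i2 j2 (tA2 ++ [PvTree.node (l.wt + r.wt) l r]) (tB ++ [v1 + v2])
            (sigB ++ [c1, c2]) hm' hj'
    · have hg' : ¬ (i < W.length ∨ tB.length - j > 1) := by
        intro hcon
        rcases hcon with h | h
        · exact hg (Or.inl h)
        · exact hg (Or.inr (by omega))
      simp only [loopA, loopB, if_neg hg, if_neg hg']

-- ===== VERDICT (by name: the statement is the Claim_ definition above) =====
theorem EISignature_spec : Claim_equal_EISignature := by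
  intro W _
  unfold Spec_EISignature EISignature EISignature_alt
  by_cases h0 : W = []
  · simp [h0]
  · have hne : W.length ≠ 0 := by simpa [List.length_eq_zero_iff] using h0
    rw [if_neg h0, if_neg hne]
    by_cases h1 : W.length = 1
    · rw [if_pos h1, if_pos h1]
    · rw [if_neg h1, if_neg h1]
      have := loop_corr (W.length + 1) (PySem.List.sorted W (fun x => x) false)
        0 0 [] [] [] (by simp) (by simp)
      rw [show ("" : String) = String.ofList [] from rfl, this]
      simp
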